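-- pv_equiv track=rewrite | github.com/amar0705/generative-ai | set-2/arrange.py | arrange_characters
-- ===== SOURCE A (Python) =====
-- def arrange_characters(str1):
--     lowercase = ""
--     uppercase = ""
--
--     for char in str1:
--         if char.islower():
--             lowercase += char
--         else:
--             uppercase += char
--
--     arranged_str = lowercase + uppercase
--     return arranged_str
-- ===== SOURCE B (Python) =====
-- def arrange_characters(str1):
--     return "".join(sorted(str1, key=lambda c: not c.islower()))
-- ===== Notes on version B (the rewrite author's own statement) =====
-- stated objective: idiomatic
-- what changed: Replaces the explicit two-accumulator partition loop by one stable sort keyed on not-islower, whose stability yields exactly lowercase-first-in-order followed by the rest.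
import Mathlib
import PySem

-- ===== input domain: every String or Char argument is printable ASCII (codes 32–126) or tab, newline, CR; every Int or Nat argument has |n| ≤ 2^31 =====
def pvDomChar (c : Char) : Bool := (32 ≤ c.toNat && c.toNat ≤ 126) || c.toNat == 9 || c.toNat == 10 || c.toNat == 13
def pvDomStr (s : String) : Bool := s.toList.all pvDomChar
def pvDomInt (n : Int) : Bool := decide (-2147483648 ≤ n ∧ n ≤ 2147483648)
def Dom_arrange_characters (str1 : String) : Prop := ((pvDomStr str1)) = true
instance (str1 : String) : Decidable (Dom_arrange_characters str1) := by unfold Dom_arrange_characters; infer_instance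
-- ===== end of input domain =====

-- B replaces A's explicit two-accumulator partition loop by a single stable sort keyed on not-islower (idiomatic; same result).


-- ===== PORT A =====
-- A: one pass, appending each char to one of two accumulators; result is lowercase ++ uppercase.
def arrange_characters (str1 : String) : String :=
  let p := str1.toList.foldl
    (fun (acc : List Char × List Char) c =>
      if PySem.Chars.islower c then (acc.1 ++ [c], acc.2) else (acc.1, acc.2 ++ [c]))
    ([], [])
  String.mk (p.1 ++ p.2)

-- ===== PORT B =====
-- B: ''.join(sorted(str1, key=lambda c: not c.islower())); the bool key False/True is ported as Int 0/1.
def arrange_characters_alt (str1 : String) : String :=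
  String.mk (PySem.List.sorted str1.toList
    (fun c => if PySem.Chars.islower c then (0 : Int) else 1) false)

-- ===== PRECONDITION & SPEC =====
def Spec_arrange_characters (str1 : String) (out : String) : Prop := out = arrange_characters_alt str1
instance (str1 : String) (out : String) : Decidable (Spec_arrange_characters str1 out) := by unfold Spec_arrange_characters; infer_instance

-- ===== CLAIM (what is proved, stated in full; the proofs are below) =====
def Claim_equal_arrange_characters : Prop := ∀ (str1 : String), Dom_arrange_characters str1 → Spec_arrange_characters str1 (arrange_characters str1)

-- ===== LEMMAS AND PROOFS =====

-- A's loop partitions: accumulators end as initial value ++ the corresponding filter.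
theorem pvFoldA (xs : List Char) (l u : List Char) :
    xs.foldl
      (fun (acc : List Char × List Char) c =>
        if PySem.Chars.islower c then (acc.1 ++ [c], acc.2) else (acc.1, acc.2 ++ [c]))
      (l, u)
    = (l ++ xs.filter (fun c => PySem.Chars.islower c),
       u ++ xs.filter (fun c => !PySem.Chars.islower c)) := by
  induction xs generalizing l u with
  | nil => simp
  | cons c cs ih =>
    by_cases h : PySem.Chars.islower c = true <;>
      simp [List.foldl_cons, h, ih]

theorem pvInsertBy_append {α : Type} (before : α → α → Bool) (x : α) (l u : List α)
    (hl : ∀ y ∈ l, before x y = false) (hu : ∀ y ∈ u, before x y = true) :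
    PySem.List.insertBy before x (l ++ u) = l ++ x :: u := by
  induction l with
  | nil =>
    cases u with
    | nil => simp [PySem.List.insertBy]
    | cons y ys => simp [PySem.List.insertBy, hu y (by simp)]
  | cons a l' ih =>
    have ha := hl a (by simp)
    simp only [List.cons_append, PySem.List.insertBy, ha, Bool.false_eq_true, if_false]
    exact congrArg (a :: ·) (ih (fun y hy => hl y (by simp [hy])))

-- The stable insertion-sort fold with the 0/1 key keeps a partitioned accumulator.
theorem pvFoldSort (xs : List Char) (l u : List Char)
    (hl : ∀ c ∈ l, PySem.Chars.islower c = true)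
    (hu : ∀ c ∈ u, PySem.Chars.islower c = false) :
    xs.foldl
      (fun acc x => PySem.List.insertBy
        (fun a b => decide ((if PySem.Chars.islower a then (0 : Int) else 1)
                          < (if PySem.Chars.islower b then (0 : Int) else 1))) x acc)
      (l ++ u)
    = (l ++ xs.filter (fun c => PySem.Chars.islower c))
      ++ (u ++ xs.filter (fun c => !PySem.Chars.islower c)) := by
  induction xs generalizing l u with
  | nil => simp
  | cons c cs ih =>
    by_cases h : PySem.Chars.islower c = true
    · have h1 : ∀ y ∈ l, (decide ((if PySem.Chars.islower c then (0 : Int) else 1)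
          < (if PySem.Chars.islower y then (0 : Int) else 1))) = false := by
        intro y hy; simp [h, hl y hy]
      have h2 : ∀ y ∈ u, (decide ((if PySem.Chars.islower c then (0 : Int) else 1)
          < (if PySem.Chars.islower y then (0 : Int) else 1))) = true := by
        intro y hy; simp [h, hu y hy]
      have hl' : ∀ d ∈ l ++ [c], PySem.Chars.islower d = true := by
        intro d hd
        rcases List.mem_append.1 hd with h' | h'
        · exact hl d h'
        · simp only [List.mem_singleton] at h'; subst h'; exact h
      rw [List.foldl_cons, pvInsertBy_append _ c l u h1 h2,
        show l ++ c :: u = (l ++ [c]) ++ u by simp,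
        ih (l ++ [c]) u hl' hu]
      simp [h]
    · have h1 : ∀ y ∈ l ++ u, (decide ((if PySem.Chars.islower c then (0 : Int) else 1)
          < (if PySem.Chars.islower y then (0 : Int) else 1))) = false := by
        intro y hy
        rcases List.mem_append.1 hy with h' | h'
        · simp [h, hl y h']
        · simp [h, hu y h']
      have hu' : ∀ d ∈ u ++ [c], PySem.Chars.islower d = false := by
        intro d hd
        rcases List.mem_append.1 hd with h' | h'
        · exact hu d h'
        · simp only [List.mem_singleton] at h'; subst h'
          exact eq_false_of_ne_true h
      rw [List.foldl_cons,
        PySem.List.insertBy_of_forall_not_before _ c (l ++ u) h1,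
        show (l ++ u) ++ [c] = l ++ (u ++ [c]) by simp,
        ih l (u ++ [c]) hl hu']
      simp [h]

theorem pvSortedChar (xs : List Char) :
    PySem.List.sorted xs (fun c => if PySem.Chars.islower c then (0 : Int) else 1) false
    = xs.filter (fun c => PySem.Chars.islower c)
      ++ xs.filter (fun c => !PySem.Chars.islower c) := by
  have := pvFoldSort xs [] [] (by simp) (by simp)
  simpa [PySem.List.sorted] using this

-- ===== VERDICT (by name: the statement is the Claim_ definition above) =====
theorem arrange_characters_spec : Claim_equal_arrange_characters := by
  intro str1 _
  unfold Spec_arrange_characters arrange_characters arrange_characters_alt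
  rw [pvSortedChar, pvFoldA]
  simp
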